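-- pv_equiv track=rewrite | github.com/zanderbraam/truffle-ta | app.py | rw_extremes
-- ===== SOURCE A (Python) =====
-- def rw_top(data, curr_index, order):
--     if curr_index < order * 2 + 1:
--         return False
--
--     top = True
--     k = curr_index - order
--     v = data[k]
--     for i in range(1, order + 1):
--         if data[k + i] > v or data[k - i] > v:
--             top = False
--             break
--
--     return top
--
-- def rw_bottom(data, curr_index, order):
--     if curr_index < order * 2 + 1:
--         return False
--
--     bottom = True
--     k = curr_index - order
--     v = data[k]
--     for i in range(1, order + 1):
--         if data[k + i] < v or data[k - i] < v:
--             bottom = False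
--             break
--
--     return bottom
--
-- def rw_extremes(data, order):
--     tops = []
--     bottoms = []
--     for i in range(len(data)):
--         if rw_top(data, i, order):
--             top = [i, i - order, data[i - order]]
--             tops.append(top)
--
--         if rw_bottom(data, i, order):
--             bottom = [i, i - order, data[i - order]]
--             bottoms.append(bottom)
--
--     return tops, bottoms
-- ===== SOURCE B (Python) =====
-- from collections import deque
--
-- def rw_extremes(data, order):
--     tops, bottoms = [], []
--     if order < 0:
--         return tops, bottoms
--     w = 2 * order
--     maxdq, mindq = deque(), deque()
--     for i, x in enumerate(data):
--         while maxdq and data[maxdq[-1]] <= x: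
--             maxdq.pop()
--         maxdq.append(i)
--         while mindq and data[mindq[-1]] >= x:
--             mindq.pop()
--         mindq.append(i)
--         if maxdq[0] < i - w:
--             maxdq.popleft()
--         if mindq[0] < i - w:
--             mindq.popleft()
--         if i > w:
--             k = i - order
--             v = data[k]
--             if v == data[maxdq[0]]:
--                 tops.append([i, k, v])
--             if v == data[mindq[0]]:
--                 bottoms.append([i, k, v])
--     return tops, bottoms
-- ===== Notes on version B (the rewrite author's own statement) =====
-- stated objective: alternative
-- what changed: Replaces the per-index neighbour rescans (rw_top/rw_bottom) with a single pass keeping monotonic deques of candidate indices and flagging a position when the window centre equals the deque front (sliding-window max/min).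
import Mathlib
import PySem

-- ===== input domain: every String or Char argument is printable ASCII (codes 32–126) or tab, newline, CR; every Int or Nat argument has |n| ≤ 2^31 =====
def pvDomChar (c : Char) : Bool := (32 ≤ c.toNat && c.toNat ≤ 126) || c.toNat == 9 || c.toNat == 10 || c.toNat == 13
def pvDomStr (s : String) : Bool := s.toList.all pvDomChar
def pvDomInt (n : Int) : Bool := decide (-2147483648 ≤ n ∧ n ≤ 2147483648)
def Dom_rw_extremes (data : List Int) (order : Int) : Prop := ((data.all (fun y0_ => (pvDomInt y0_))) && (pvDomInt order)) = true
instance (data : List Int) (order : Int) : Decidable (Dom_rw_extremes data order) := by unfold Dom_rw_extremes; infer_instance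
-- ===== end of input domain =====

-- B replaces A's per-index neighbour rescans by a single pass with monotonic deques (objective: alternative algorithm of similar measured cost).
-- Indexing is ported as pyGetD _ _ 0: inside Pre_ every index either program reads is in range, so the default is never used.

-- ===== PORT A =====
-- 'for i in range(1, order+1): if data[k+i] > v or data[k-i] > v: top=False; break'
def rwTopLoop (data : List Int) (k v : Int) : List Int → Bool
  | [] => true
  | i :: rest =>
    if PySem.List.pyGetD data (k + i) 0 > v || PySem.List.pyGetD data (k - i) 0 > v then false
    else rwTopLoop data k v rest

def rw_top (data : List Int) (curr_index order : Int) : Bool :=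
  if curr_index < order * 2 + 1 then false
  else rwTopLoop data (curr_index - order) (PySem.List.pyGetD data (curr_index - order) 0)
      (PySem.List.pyRange 1 (order + 1) 1)

def rwBottomLoop (data : List Int) (k v : Int) : List Int → Bool
  | [] => true
  | i :: rest =>
    if PySem.List.pyGetD data (k + i) 0 < v || PySem.List.pyGetD data (k - i) 0 < v then false
    else rwBottomLoop data k v rest

def rw_bottom (data : List Int) (curr_index order : Int) : Bool :=
  if curr_index < order * 2 + 1 then false
  else rwBottomLoop data (curr_index - order) (PySem.List.pyGetD data (curr_index - order) 0)
      (PySem.List.pyRange 1 (order + 1) 1)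

def rw_extremes (data : List Int) (order : Int) : List (List Int) × List (List Int) :=
  (PySem.List.pyRange 0 (PySem.List.len data) 1).foldl
    (fun acc i =>
      let acc := if rw_top data i order then
          (acc.1 ++ [[i, i - order, PySem.List.pyGetD data (i - order) 0]], acc.2) else acc
      let acc := if rw_bottom data i order then
          (acc.1, acc.2 ++ [[i, i - order, PySem.List.pyGetD data (i - order) 0]]) else acc
      acc)
    ([], [])

-- ===== PORT B =====
-- Deques hold indices, stored back-to-front (list head = Python's dq[-1], getLast = Python's dq[0]).
-- 'while maxdq and data[maxdq[-1]] <= x: maxdq.pop(); maxdq.append(i)'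
def pushMax (data : List Int) (dq : List Int) (i x : Int) : List Int :=
  i :: dq.dropWhile (fun j => decide (PySem.List.pyGetD data j 0 ≤ x))

-- 'while mindq and data[mindq[-1]] >= x: mindq.pop(); mindq.append(i)'
def pushMin (data : List Int) (dq : List Int) (i x : Int) : List Int :=
  i :: dq.dropWhile (fun j => decide (x ≤ PySem.List.pyGetD data j 0))

-- 'if dq[0] < i - w: dq.popleft()'
def evict (w i : Int) (dq : List Int) : List Int :=
  if dq.getLastD 0 < i - w then dq.dropLast else dq

-- the body of B's single 'for i, x in enumerate(data)' loop
def rwStep (data : List Int) (order w : Int)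
    (st : List Int × List Int × List (List Int) × List (List Int)) (p : Int × Int) :
    List Int × List Int × List (List Int) × List (List Int) :=
  let maxdq := evict w p.1 (pushMax data st.1 p.1 p.2)
  let mindq := evict w p.1 (pushMin data st.2.1 p.1 p.2)
  if w < p.1 then
    let k := p.1 - order
    let v := PySem.List.pyGetD data k 0
    (maxdq, mindq,
      (if v = PySem.List.pyGetD data (maxdq.getLastD 0) 0 then st.2.2.1 ++ [[p.1, k, v]] else st.2.2.1),
      (if v = PySem.List.pyGetD data (mindq.getLastD 0) 0 then st.2.2.2 ++ [[p.1, k, v]] else st.2.2.2))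
  else (maxdq, mindq, st.2.2.1, st.2.2.2)

def rw_extremes_alt (data : List Int) (order : Int) : List (List Int) × List (List Int) :=
  if order < 0 then ([], [])
  else
    let st := (PySem.List.enumerate data 0).foldl (rwStep data order (2 * order)) ([], [], [], [])
    (st.2.2.1, st.2.2.2)

-- ===== PRECONDITION & SPEC =====
-- Pre_ excludes negative order on nonempty data, where A raises IndexError (data[i - order] runs past the end).
def Pre_rw_extremes (data : List Int) (order : Int) : Prop := 0 ≤ order ∨ data = []
instance (data : List Int) (order : Int) : Decidable (Pre_rw_extremes data order) := by
  unfold Pre_rw_extremes; infer_instance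

def pvWitness_rw_extremes : List Int × Int := ([5, 1, 4, 2, 3, 2, 6], 1)

def Spec_rw_extremes (data : List Int) (order : Int) (out : List (List Int) × List (List Int)) : Prop :=
  out = rw_extremes_alt data order
instance (data : List Int) (order : Int) (out : List (List Int) × List (List Int)) :
    Decidable (Spec_rw_extremes data order out) := by unfold Spec_rw_extremes; infer_instance

-- ===== CLAIM (what is proved, stated in full; the proofs are below) =====
def Claim_equal_rw_extremes : Prop := ∀ (data : List Int) (order : Int),
  Dom_rw_extremes data order → Pre_rw_extremes data order →
    Spec_rw_extremes data order (rw_extremes data order)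

-- ===== LEMMAS AND PROOFS =====

-- The common characterisation both programs are reduced to: position i is recorded iff
-- w + 1 ≤ i and data[i-order] is the max (resp. min) of the window [i-2*order, i].
def isTopB (data : List Int) (order i : Int) : Bool :=
  decide (2 * order + 1 ≤ i) &&
    (PySem.List.pyRange (i - 2 * order) (i + 1) 1).all
      (fun t => decide (PySem.List.pyGetD data t 0 ≤ PySem.List.pyGetD data (i - order) 0))

def isBotB (data : List Int) (order i : Int) : Bool :=
  decide (2 * order + 1 ≤ i) &&
    (PySem.List.pyRange (i - 2 * order) (i + 1) 1).all
      (fun t => decide (PySem.List.pyGetD data (i - order) 0 ≤ PySem.List.pyGetD data t 0))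

def entryAt (data : List Int) (order i : Int) : List Int :=
  [i, i - order, PySem.List.pyGetD data (i - order) 0]

def topsSpec (data : List Int) (order : Int) (m : Int) : List (List Int) :=
  ((PySem.List.pyRange 0 m 1).filter (isTopB data order)).map (entryAt data order)

def botsSpec (data : List Int) (order : Int) (m : Int) : List (List Int) :=
  ((PySem.List.pyRange 0 m 1).filter (isBotB data order)).map (entryAt data order)

-- ---- A-side characterisation ----
lemma rwTopLoop_eq_all (data : List Int) (k v : Int) (l : List Int) :
    rwTopLoop data k v l = l.all (fun j =>
      decide (PySem.List.pyGetD data (k + j) 0 ≤ v) && decide (PySem.List.pyGetD data (k - j) 0 ≤ v)) := by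
  induction l with
  | nil => rfl
  | cons i rest ih =>
    simp only [rwTopLoop, List.all_cons, ih]
    by_cases h1 : PySem.List.pyGetD data (k + i) 0 > v <;>
      by_cases h2 : PySem.List.pyGetD data (k - i) 0 > v <;>
      simp [h1, h2, le_of_not_gt]

lemma rwBottomLoop_eq_all (data : List Int) (k v : Int) (l : List Int) :
    rwBottomLoop data k v l = l.all (fun j =>
      decide (v ≤ PySem.List.pyGetD data (k + j) 0) && decide (v ≤ PySem.List.pyGetD data (k - j) 0)) := by
  induction l with
  | nil => rfl
  | cons i rest ih =>
    simp only [rwBottomLoop, List.all_cons, ih]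
    by_cases h1 : PySem.List.pyGetD data (k + i) 0 < v <;>
      by_cases h2 : PySem.List.pyGetD data (k - i) 0 < v <;>
      simp [h1, h2, le_of_not_gt]

lemma rw_top_eq_isTopB (data : List Int) (order i : Int) (h : 0 ≤ order) :
    rw_top data i order = isTopB data order i := by
  unfold rw_top isTopB
  by_cases hi : i < order * 2 + 1
  · simp [hi, show ¬ (2 * order + 1 ≤ i) by omega]
  · rw [if_neg hi, rwTopLoop_eq_all, Bool.eq_iff_iff]
    simp only [List.all_eq_true, PySem.List.mem_pyRange_one, Bool.and_eq_true, decide_eq_true_eq,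
      show (2 * order + 1 ≤ i) by omega, decide_true, Bool.true_and, and_imp]
    constructor
    · intro hall t ht1 ht2
      rcases lt_trichotomy t (i - order) with h3 | h3 | h3
      · have := (hall (i - order - t) (by omega) (by omega)).2
        have e : i - order - (i - order - t) = t := by omega
        rwa [e] at this
      · rw [h3]
      · have := (hall (t - (i - order)) (by omega) (by omega)).1
        have e : i - order + (t - (i - order)) = t := by omega
        rwa [e] at this
    · intro hall j hj1 hj2
      exact ⟨hall (i - order + j) (by omega) (by omega), hall (i - order - j) (by omega) (by omega)⟩

lemma rw_bottom_eq_isBotB (data : List Int) (order i : Int) (h : 0 ≤ order) :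
    rw_bottom data i order = isBotB data order i := by
  unfold rw_bottom isBotB
  by_cases hi : i < order * 2 + 1
  · simp [hi, show ¬ (2 * order + 1 ≤ i) by omega]
  · rw [if_neg hi, rwBottomLoop_eq_all, Bool.eq_iff_iff]
    simp only [List.all_eq_true, PySem.List.mem_pyRange_one, Bool.and_eq_true, decide_eq_true_eq,
      show (2 * order + 1 ≤ i) by omega, decide_true, Bool.true_and, and_imp]
    constructor
    · intro hall t ht1 ht2
      rcases lt_trichotomy t (i - order) with h3 | h3 | h3
      · have := (hall (i - order - t) (by omega) (by omega)).2
        have e : i - order - (i - order - t) = t := by omega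
        rwa [e] at this
      · rw [h3]
      · have := (hall (t - (i - order)) (by omega) (by omega)).1
        have e : i - order + (t - (i - order)) = t := by omega
        rwa [e] at this
    · intro hall j hj1 hj2
      exact ⟨hall (i - order + j) (by omega) (by omega), hall (i - order - j) (by omega) (by omega)⟩

lemma A_char (data : List Int) (order : Int) (h : 0 ≤ order) :
    rw_extremes data order =
      (topsSpec data order (data.length), botsSpec data order (data.length)) := by
  unfold rw_extremes
  rw [PySem.List.foldl_congr_mem _ _
      (fun (acc : List (List Int) × List (List Int)) i =>
        ((fun (a : List (List Int)) (i : Int) =>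
            if isTopB data order i then a ++ [entryAt data order i] else a) acc.1 i,
         (fun (a : List (List Int)) (i : Int) =>
            if isBotB data order i then a ++ [entryAt data order i] else a) acc.2 i)) _
      (by
        intro acc i _
        cases htop : rw_top data i order <;> cases hbot : rw_bottom data i order <;>
          simp [entryAt, htop, hbot, ← rw_top_eq_isTopB data order i h,
            ← rw_bottom_eq_isBotB data order i h]),
    PySem.List.foldl_prod_mk
      (fun (a : List (List Int)) (i : Int) =>
        if isTopB data order i then a ++ [entryAt data order i] else a)
      (fun (a : List (List Int)) (i : Int) =>
        if isBotB data order i then a ++ [entryAt data order i] else a),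
    PySem.List.foldl_append_if, PySem.List.foldl_append_if]
  simp [topsSpec, botsSpec]

-- ---- B-side: deque invariant ----
def InvMax (data : List Int) (w i : Int) (dq : List Int) : Prop :=
  dq ≠ [] ∧
  dq.Pairwise (fun a b => b < a) ∧
  (∀ j ∈ dq, 0 ≤ j ∧ j ≤ i ∧ i ≤ j + w) ∧
  dq.Pairwise (fun a b => PySem.List.pyGetD data a 0 < PySem.List.pyGetD data b 0) ∧
  (∀ t : Int, 0 ≤ t → t ≤ i → i ≤ t + w →
    ∃ j ∈ dq, t ≤ j ∧ PySem.List.pyGetD data t 0 ≤ PySem.List.pyGetD data j 0)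

lemma invMax_step (data : List Int) (w i : Int) (dq : List Int) (hw : 0 ≤ w)
    (h : (i = 0 ∧ dq = []) ∨ (1 ≤ i ∧ InvMax data w (i - 1) dq)) :
    InvMax data w i (evict w i (pushMax data dq i (PySem.List.pyGetD data i 0))) := by
  rcases h with ⟨hi0, hdq⟩ | ⟨hi, hne, hidx, hbnd, hval, hcov⟩
  · subst hi0; subst hdq
    have he : evict w 0 (pushMax data [] 0 (PySem.List.pyGetD data 0 0)) = [0] := by
      unfold pushMax evict
      simp only [List.dropWhile_nil]
      rw [if_neg (by have h0 : ([(0:Int)].getLastD 0) = 0 := rfl; rw [h0]; omega)]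
    rw [he]
    refine ⟨by simp, by simp, by intro j hj; simp at hj; omega, by simp, ?_⟩
    intro t ht0 ht1 _
    exact ⟨0, by simp, by omega, by rw [show t = 0 by omega]⟩
  · set x := PySem.List.pyGetD data i 0 with hx
    set p := fun j => decide (PySem.List.pyGetD data j 0 ≤ x) with hp
    set d0 := dq.dropWhile p with hd0
    have hsub0 : d0.Sublist dq := List.dropWhile_sublist p
    have hmem0 : ∀ j ∈ d0, j ∈ dq := fun j hj => hsub0.mem hj
    have hlt : ∀ j ∈ d0, j < i := by
      intro j hj; have := hbnd j (hmem0 j hj); omega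
    -- A1: index pairwise of i :: d0
    have hA1 : (i :: d0).Pairwise (fun a b => b < a) :=
      List.pairwise_cons.mpr ⟨hlt, hidx.sublist hsub0⟩
    -- A2: value pairwise of i :: d0
    have hA2 : (i :: d0).Pairwise
        (fun a b => PySem.List.pyGetD data a 0 < PySem.List.pyGetD data b 0) := by
      refine List.pairwise_cons.mpr ⟨?_, hval.sublist hsub0⟩
      intro j hj
      cases hc : d0 with
      | nil => rw [hc] at hj; simp at hj
      | cons hd tl =>
        rw [hc] at hj
        have e : dq.dropWhile p = hd :: tl := by rw [← hd0]; exact hc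
        have hhd : p hd = false := by
          have h2 := List.head_dropWhile_not p (l := dq) (by rw [e]; simp)
          simpa [e] using h2
        have hxhd : x < PySem.List.pyGetD data hd 0 := by
          rw [hp] at hhd; simpa using hhd
        rcases List.mem_cons.mp hj with rfl | hjtl
        · exact hxhd
        · have hpd0 := hval.sublist hsub0
          rw [hc] at hpd0
          exact lt_trans hxhd ((List.pairwise_cons.mp hpd0).1 j hjtl)
    -- A3: bounds (before eviction)
    have hA3 : ∀ j ∈ (i :: d0), 0 ≤ j ∧ j ≤ i ∧ i - 1 ≤ j + w := by
      intro j hj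
      rcases List.mem_cons.mp hj with rfl | hj
      · omega
      · have := hbnd j (hmem0 j hj); omega
    -- A4: coverage (before eviction)
    have hA4 : ∀ t : Int, 0 ≤ t → t ≤ i → i ≤ t + w →
        ∃ j ∈ (i :: d0), t ≤ j ∧ PySem.List.pyGetD data t 0 ≤ PySem.List.pyGetD data j 0 := by
      intro t ht0 ht1 ht2
      rcases eq_or_lt_of_le ht1 with rfl | htlt
      · exact ⟨t, by simp, le_refl t, le_refl _⟩
      · obtain ⟨j, hjdq, htj, hgtj⟩ := hcov t ht0 (by omega) (by omega)
        rw [← List.takeWhile_append_dropWhile (p := p) (l := dq)] at hjdq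
        rcases List.mem_append.mp hjdq with hjt | hjd
        · have hpj : p j = true := List.mem_takeWhile_imp hjt
          rw [hp] at hpj
          exact ⟨i, by simp, by omega, le_trans hgtj (by simpa using hpj)⟩
        · exact ⟨j, by simp [hd0, hjd], htj, hgtj⟩
    -- getLast of i :: d0 is its minimum
    have hd1ne : (i :: d0) ≠ [] := by simp
    have hgl : (i :: d0).getLastD 0 = (i :: d0).getLast hd1ne := by
      rw [List.getLastD_eq_getLast?, List.getLast?_eq_some_getLast (h := hd1ne)]; rfl
    have hlast_mem : (i :: d0).getLastD 0 ∈ (i :: d0) := by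
      rw [hgl]; exact List.getLast_mem hd1ne
    have hlast_min : ∀ j ∈ (i :: d0), (i :: d0).getLastD 0 ≤ j := by
      intro j hj
      rw [hgl]
      have hsplit := List.dropLast_append_getLast hd1ne
      rcases List.mem_append.mp (hsplit ▸ hj) with hjd | hjl
      · have := (List.pairwise_append.mp (hsplit ▸ hA1)).2.2 j hjd ((i :: d0).getLast hd1ne) (by simp)
        omega
      · simp at hjl; omega
    unfold evict
    rw [show pushMax data dq i x = i :: d0 from rfl]
    by_cases hev : (i :: d0).getLastD 0 < i - w
    · -- front evicted
      rw [if_pos hev]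
      set f := (i :: d0).getLastD 0 with hf
      have hsplit := List.dropLast_append_getLast hd1ne
      have hfval : (i :: d0).getLast hd1ne = f := hgl.symm
      have hmem_drop : ∀ j ∈ (i :: d0).dropLast, j ∈ (i :: d0) :=
        fun j hj => (List.dropLast_sublist _).mem hj
      have hgtf : ∀ j ∈ (i :: d0).dropLast, f < j := by
        intro j hj
        have := (List.pairwise_append.mp (hsplit ▸ hA1)).2.2 j hj ((i :: d0).getLast hd1ne) (by simp)
        rw [hfval] at this
        exact this
      have hmem_back : ∀ j ∈ (i :: d0), f < j → j ∈ (i :: d0).dropLast := by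
        intro j hj hfj
        rcases List.mem_append.mp (hsplit ▸ hj) with h1 | h1
        · exact h1
        · simp [hfval] at h1; omega
      -- d0 nonempty (else f = i and no eviction)
      have hd0ne : d0 ≠ [] := by
        intro hnil
        have hfi : f = i := by rw [hf, hnil]; rfl
        omega
      have hfd0 : f ∈ d0 := by
        rcases List.mem_cons.mp hlast_mem with h1 | h1
        · exfalso; omega
        · exact h1
      have hfbnd := hbnd f (hmem0 f hfd0)
      refine ⟨?_, hA1.sublist (List.dropLast_sublist _), ?_, hA2.sublist (List.dropLast_sublist _), ?_⟩
      · -- nonempty: i is in dropLast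
        intro hnil
        have : i ∈ (i :: d0).dropLast := hmem_back i (by simp) (by
          have := hlt f hfd0; omega)
        rw [hnil] at this; simp at this
      · intro j hj
        have h1 := hA3 j (hmem_drop j hj)
        have h2 := hgtf j hj
        omega
      · intro t ht0 ht1 ht2
        obtain ⟨j, hj, htj, hgj⟩ := hA4 t ht0 ht1 ht2
        exact ⟨j, hmem_back j hj (by omega), htj, hgj⟩
    · -- no eviction
      rw [if_neg hev]
      refine ⟨hd1ne, hA1, ?_, hA2, hA4⟩
      intro j hj
      have h1 := hA3 j hj
      have h2 := hlast_min j hj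
      omega

lemma front_max (data : List Int) (w i : Int) (dq : List Int) (hInv : InvMax data w i dq)
    (k : Int) (hk0 : 0 ≤ k) (hk1 : k ≤ i) (hk2 : i ≤ k + w) :
    (PySem.List.pyGetD data k 0 = PySem.List.pyGetD data (dq.getLastD 0) 0) ↔
      (∀ t : Int, 0 ≤ t → t ≤ i → i ≤ t + w →
        PySem.List.pyGetD data t 0 ≤ PySem.List.pyGetD data k 0) := by
  obtain ⟨hne, hidx, hbnd, hval, hcov⟩ := hInv
  have hgl : dq.getLastD 0 = dq.getLast hne := by
    rw [List.getLastD_eq_getLast?, List.getLast?_eq_some_getLast (h := hne)]; rfl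
  have hlmem : dq.getLastD 0 ∈ dq := by rw [hgl]; exact List.getLast_mem hne
  have hsplit := List.dropLast_append_getLast hne
  have hmax : ∀ j ∈ dq,
      PySem.List.pyGetD data j 0 ≤ PySem.List.pyGetD data (dq.getLastD 0) 0 := by
    intro j hj
    rcases List.mem_append.mp (hsplit ▸ hj) with h1 | h1
    · have := (List.pairwise_append.mp (hsplit ▸ hval)).2.2 j h1 (dq.getLast hne) (by simp)
      rw [← hgl] at this
      exact le_of_lt this
    · have h2 : j = dq.getLast hne := by simpa using h1
      exact le_of_eq (by rw [h2, hgl])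
  have hfb := hbnd _ hlmem
  constructor
  · intro he t ht0 ht1 ht2
    obtain ⟨j, hj, _, hgj⟩ := hcov t ht0 ht1 ht2
    rw [he]
    exact le_trans hgj (hmax j hj)
  · intro hall
    have h1 : PySem.List.pyGetD data (dq.getLastD 0) 0 ≤ PySem.List.pyGetD data k 0 :=
      hall _ hfb.1 hfb.2.1 hfb.2.2
    obtain ⟨j, hj, _, hgj⟩ := hcov k hk0 hk1 hk2
    exact le_antisymm (le_trans hgj (hmax j hj)) h1

-- the max-deque state after the first m iterations
def dqMax (data : List Int) (w : Int) (m : Nat) : List Int :=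
  (PySem.List.pyRange 0 (m : Int) 1).foldl
    (fun dq j => evict w j (pushMax data dq j (PySem.List.pyGetD data j 0))) []

lemma dqMax_succ (data : List Int) (w : Int) (m : Nat) :
    dqMax data w (m + 1) =
      evict w (m : Int) (pushMax data (dqMax data w m) (m : Int) (PySem.List.pyGetD data (m : Int) 0)) := by
  unfold dqMax
  rw [show ((m + 1 : Nat) : Int) = (m : Int) + 1 by push_cast; ring,
    PySem.List.pyRange_one_succ_right (by omega : (0 : Int) ≤ (m : Int)), List.foldl_append]
  rfl

lemma invMax_dqMax (data : List Int) (w : Int) (hw : 0 ≤ w) (m : Nat) (hm : 1 ≤ m) :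
    InvMax data w ((m : Int) - 1) (dqMax data w m) := by
  induction m with
  | zero => omega
  | succ n ih =>
    have hstep := invMax_step data w (n : Int) (dqMax data w n) hw (by
      rcases Nat.eq_zero_or_pos n with rfl | hn
      · left
        refine ⟨by simp, ?_⟩
        unfold dqMax
        rw [show ((0 : Nat) : Int) = 0 by simp, PySem.List.pyRange_one_eq_nil (by omega)]
        rfl
      · right
        exact ⟨by omega, ih (by omega)⟩)
    rw [dqMax_succ, show ((n + 1 : Nat) : Int) - 1 = (n : Int) by push_cast; ring]
    exact hstep

-- ---- min side via negation ----
lemma gd_neg (data : List Int) (j : Int) :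
    PySem.List.pyGetD (data.map (fun y => -y)) j 0 = - PySem.List.pyGetD data j 0 := by
  have := PySem.List.pyGetD_map (f := fun y : Int => -y) (xs := data) (i := j) (d := 0)
  simpa using this

lemma pushMin_eq_pushMax_neg (data : List Int) (dq : List Int) (i x : Int) :
    pushMin data dq i x = pushMax (data.map (fun y => -y)) dq i (-x) := by
  unfold pushMin pushMax
  congr 1
  congr 1
  funext j
  rw [gd_neg]
  exact decide_eq_decide.mpr (by omega)


lemma spec_succ_top (data : List Int) (order m : Int) (h0 : 0 ≤ m) :
    topsSpec data order (m + 1) =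
      topsSpec data order m ++ (if isTopB data order m then [entryAt data order m] else []) := by
  unfold topsSpec
  rw [PySem.List.pyRange_one_succ_right h0, List.filter_append, List.map_append]
  cases h : isTopB data order m <;> simp [h]

lemma spec_succ_bot (data : List Int) (order m : Int) (h0 : 0 ≤ m) :
    botsSpec data order (m + 1) =
      botsSpec data order m ++ (if isBotB data order m then [entryAt data order m] else []) := by
  unfold botsSpec
  rw [PySem.List.pyRange_one_succ_right h0, List.filter_append, List.map_append]
  cases h : isBotB data order m <;> simp [h]

lemma query_top (data : List Int) (order : Int) (h : 0 ≤ order) (n : Nat)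
    (hn : 2 * order < (n : Int)) :
    (PySem.List.pyGetD data ((n : Int) - order) 0 =
        PySem.List.pyGetD data ((dqMax data (2 * order) (n + 1)).getLastD 0) 0) ↔
      isTopB data order (n : Int) = true := by
  have hinv := invMax_dqMax data (2 * order) (by omega) (n + 1) (by omega)
  rw [show ((n + 1 : Nat) : Int) - 1 = (n : Int) by push_cast; ring] at hinv
  rw [front_max data (2 * order) (n : Int) _ hinv ((n : Int) - order)
      (by omega) (by omega) (by omega)]
  unfold isTopB
  simp only [List.all_eq_true, PySem.List.mem_pyRange_one, Bool.and_eq_true, decide_eq_true_eq,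
    and_imp]
  constructor
  · intro hall
    exact ⟨by omega, fun t ht1 ht2 => hall t (by omega) (by omega) (by omega)⟩
  · intro hall t ht0 ht1 ht2
    exact hall.2 t (by omega) (by omega)

lemma query_bot (data : List Int) (order : Int) (h : 0 ≤ order) (n : Nat)
    (hn : 2 * order < (n : Int)) :
    (PySem.List.pyGetD data ((n : Int) - order) 0 =
        PySem.List.pyGetD data
          ((dqMax (data.map (fun y => -y)) (2 * order) (n + 1)).getLastD 0) 0) ↔
      isBotB data order (n : Int) = true := by
  have hinv := invMax_dqMax (data.map (fun y => -y)) (2 * order) (by omega) (n + 1) (by omega)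
  rw [show ((n + 1 : Nat) : Int) - 1 = (n : Int) by push_cast; ring] at hinv
  have hfm := front_max (data.map (fun y => -y)) (2 * order) (n : Int) _ hinv ((n : Int) - order)
      (by omega) (by omega) (by omega)
  have h1 : (PySem.List.pyGetD data ((n : Int) - order) 0 =
      PySem.List.pyGetD data
        ((dqMax (data.map (fun y => -y)) (2 * order) (n + 1)).getLastD 0) 0) ↔
      (PySem.List.pyGetD (data.map (fun y => -y)) ((n : Int) - order) 0 =
        PySem.List.pyGetD (data.map (fun y => -y))
          ((dqMax (data.map (fun y => -y)) (2 * order) (n + 1)).getLastD 0) 0) := by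
    rw [gd_neg, gd_neg]
    constructor <;> intro h2 <;> omega
  rw [h1, hfm]
  unfold isBotB
  simp only [List.all_eq_true, PySem.List.mem_pyRange_one, Bool.and_eq_true, decide_eq_true_eq,
    and_imp]
  constructor
  · intro hall
    refine ⟨by omega, fun t ht1 ht2 => ?_⟩
    have h3 := hall t (by omega) (by omega) (by omega)
    rw [gd_neg, gd_neg] at h3
    omega
  · intro hall t ht0 ht1 ht2
    rw [gd_neg, gd_neg]
    have h3 := hall.2 t (by omega) (by omega)
    omega

-- ---- B main fold ----
lemma B_fold (data : List Int) (order : Int) (h : 0 ≤ order) (m : Nat) :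
    (PySem.List.pyRange 0 (m : Int) 1).foldl
        (fun st j => rwStep data order (2 * order) st (j, PySem.List.pyGetD data j 0)) ([], [], [], []) =
      (dqMax data (2 * order) m, dqMax (data.map (fun y => -y)) (2 * order) m,
       topsSpec data order (m : Int), botsSpec data order (m : Int)) := by
  induction m with
  | zero =>
    unfold dqMax topsSpec botsSpec
    rw [show ((0 : Nat) : Int) = 0 by simp, PySem.List.pyRange_one_eq_nil (by omega)]
    rfl
  | succ n ih =>
    rw [show ((n + 1 : Nat) : Int) = (n : Int) + 1 by push_cast; ring,
      PySem.List.pyRange_one_succ_right (by omega), List.foldl_append, ih]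
    simp only [List.foldl_cons, List.foldl_nil]
    have e1 : evict (2 * order) (n : Int)
        (pushMax data (dqMax data (2 * order) n) (n : Int) (PySem.List.pyGetD data (n : Int) 0)) =
        dqMax data (2 * order) (n + 1) := (dqMax_succ data (2 * order) n).symm
    have e2 : evict (2 * order) (n : Int)
        (pushMin data (dqMax (data.map (fun y => -y)) (2 * order) n) (n : Int)
          (PySem.List.pyGetD data (n : Int) 0)) =
        dqMax (data.map (fun y => -y)) (2 * order) (n + 1) := by
      rw [pushMin_eq_pushMax_neg, ← gd_neg]
      exact (dqMax_succ (data.map (fun y => -y)) (2 * order) n).symm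
    unfold rwStep
    simp only []
    rw [e1, e2]
    by_cases hcase : 2 * order < (n : Int)
    · rw [if_pos hcase, spec_succ_top data order (n : Int) (by omega),
        spec_succ_bot data order (n : Int) (by omega)]
      have hqt := query_top data order h n hcase
      have hqb := query_bot data order h n hcase
      by_cases hq1 : isTopB data order (n : Int) = true <;>
        by_cases hq2 : isBotB data order (n : Int) = true <;>
        (simp only [hqt, hqb]; simp [hq1, hq2, entryAt])
    · rw [if_neg hcase]
      have ht : isTopB data order (n : Int) = false := by
        unfold isTopB
        simp [show ¬ (2 * order + 1 ≤ (n : Int)) by omega]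
      have hb : isBotB data order (n : Int) = false := by
        unfold isBotB
        simp [show ¬ (2 * order + 1 ≤ (n : Int)) by omega]
      rw [spec_succ_top data order (n : Int) (by omega),
        spec_succ_bot data order (n : Int) (by omega), ht, hb]
      simp

lemma B_char (data : List Int) (order : Int) (h : 0 ≤ order) :
    rw_extremes_alt data order =
      (topsSpec data order (data.length), botsSpec data order (data.length)) := by
  unfold rw_extremes_alt
  rw [if_neg (by omega), PySem.List.enumerate_eq_map_pyRange (xs := data) (d := 0),
    List.foldl_map, PySem.List.len_eq]
  rw [B_fold data order h data.length]

-- ===== VERDICT (by name: the statement is the Claim_ definition above) =====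
theorem rw_extremes_spec : Claim_equal_rw_extremes := by
  intro data order _ hpre
  unfold Spec_rw_extremes
  rcases hpre with h | h
  · rw [A_char data order h, B_char data order h]
  · subst h
    by_cases h0 : 0 ≤ order
    · rw [A_char [] order h0, B_char [] order h0]
    · simp [rw_extremes, rw_extremes_alt, PySem.List.len, PySem.List.pyRange_one_eq_nil]
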